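-- pv_equiv track=rewrite | github.com/lenkoran26/geekbrains_school | 2_alghoritms_data_structures/lesson_2/task_5.py | ascii_decode
-- ===== SOURCE A (Python) =====
-- def ascii_decode(position=32, txt='', colum=1):
--     if position > 127:
--         return txt
--     else:
--         txt += str(position) + ' - ' + chr(position) + ' '
--         colum += 1
--         if colum > 10:
--             txt += '\n'
--             colum = 1
--     return ascii_decode(position + 1, txt, colum)
-- ===== SOURCE B (Python) =====
-- def ascii_decode(position=32, txt='', colum=1):
--     for p in range(position, 128):
--         txt += str(p) + ' - ' + chr(p) + ' '
--         colum += 1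
--         if colum > 10:
--             txt += '\n'
--             colum = 1
--     return txt
-- ===== Notes on version B (the rewrite author's own statement) =====
-- stated objective: idiomatic
-- what changed: Replaces the tail-recursive accumulator (one self-call per character) with a single iterative for-loop over range(position, 128) maintaining (txt, colum).
import Mathlib
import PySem

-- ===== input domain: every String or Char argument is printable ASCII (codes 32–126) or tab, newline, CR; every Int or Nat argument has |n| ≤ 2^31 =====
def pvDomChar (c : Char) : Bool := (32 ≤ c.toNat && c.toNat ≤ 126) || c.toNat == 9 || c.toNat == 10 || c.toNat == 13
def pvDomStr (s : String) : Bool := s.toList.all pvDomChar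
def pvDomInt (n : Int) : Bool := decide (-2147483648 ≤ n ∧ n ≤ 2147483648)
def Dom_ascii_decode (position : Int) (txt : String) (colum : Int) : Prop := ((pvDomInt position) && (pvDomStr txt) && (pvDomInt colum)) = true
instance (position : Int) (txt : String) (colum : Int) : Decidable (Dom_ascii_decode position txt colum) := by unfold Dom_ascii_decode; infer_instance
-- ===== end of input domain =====

-- B replaces A's tail recursion (one self-call per printed character) with a single
-- iterative loop over range(position, 128); same cost, constant stack (objective: idiomatic).

-- ===== PORT A =====
-- literal transliteration of A's tail recursion; chr(position) = Char.ofNat position.toNat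
-- (exact for 0 ≤ position ≤ 127, the only codes reached inside Pre_)
def ascii_decode (position : Int) (txt : String) (colum : Int) : String :=
  if position > 127 then txt
  else
    let txt' := txt ++ PySem.Int.toStr position ++ " - " ++ String.mk [Char.ofNat position.toNat] ++ " "
    let colum' := colum + 1
    if colum' > 10 then ascii_decode (position + 1) (txt' ++ "\n") 1
    else ascii_decode (position + 1) txt' colum'
termination_by (128 - position).toNat
decreasing_by all_goals (simp at *; omega)

-- ===== PORT B =====
-- literal transliteration of Source B: one fold over range(position, 128) carrying (txt, colum)
def ascii_decode_alt (position : Int) (txt : String) (colum : Int) : String :=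
  ((PySem.List.pyRange position 128 1).foldl
    (fun (st : String × Int) p =>
      let t := st.1 ++ PySem.Int.toStr p ++ " - " ++ String.mk [Char.ofNat p.toNat] ++ " "
      let c := st.2 + 1
      if c > 10 then (t ++ "\n", 1) else (t, c))
    (txt, colum)).1

-- ===== PRECONDITION & SPEC =====
-- Pre_ excludes negative positions, on which both Pythons raise ValueError in chr().
def Pre_ascii_decode (position : Int) (txt : String) (colum : Int) : Prop := 0 ≤ position
instance (position : Int) (txt : String) (colum : Int) : Decidable (Pre_ascii_decode position txt colum) := by unfold Pre_ascii_decode; infer_instance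
def pvWitness_ascii_decode : Int × String × Int := (120, "", 1)

def Spec_ascii_decode (position : Int) (txt : String) (colum : Int) (out : String) : Prop := out = ascii_decode_alt position txt colum
instance (position : Int) (txt : String) (colum : Int) (out : String) : Decidable (Spec_ascii_decode position txt colum out) := by unfold Spec_ascii_decode; infer_instance

-- ===== CLAIM (what is proved, stated in full; the proofs are below) =====
def Claim_equal_ascii_decode : Prop := ∀ (position : Int) (txt : String) (colum : Int), Dom_ascii_decode position txt colum → Pre_ascii_decode position txt colum → Spec_ascii_decode position txt colum (ascii_decode position txt colum)

-- ===== LEMMAS AND PROOFS =====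

-- the loop body of B's port
def pvStep (st : String × Int) (p : Int) : String × Int :=
  let t := st.1 ++ PySem.Int.toStr p ++ " - " ++ String.mk [Char.ofNat p.toNat] ++ " "
  let c := st.2 + 1
  if c > 10 then (t ++ "\n", 1) else (t, c)

theorem ascii_decode_alt_eq (position : Int) (txt : String) (colum : Int) :
    ascii_decode_alt position txt colum
      = ((PySem.List.pyRange position 128 1).foldl pvStep (txt, colum)).1 := rfl

theorem ascii_decode_eq_fold : ∀ (n : Nat) (position : Int), (128 - position).toNat = n →
    ∀ (txt : String) (colum : Int),
      ascii_decode position txt colum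
        = ((PySem.List.pyRange position 128 1).foldl pvStep (txt, colum)).1 := by
  intro n
  induction n with
  | zero =>
    intro position h txt colum
    have h128 : (128 : Int) ≤ position := by omega
    rw [ascii_decode, PySem.List.pyRange_one_eq_nil h128]
    simp only [List.foldl_nil]
    rw [if_pos (by omega)]
  | succ k ih =>
    intro position h txt colum
    have hlt : position < 128 := by omega
    rw [ascii_decode, PySem.List.pyRange_one_cons hlt]
    simp only [List.foldl_cons]
    rw [if_neg (by omega)]
    have hk : (128 - (position + 1)).toNat = k := by omega
    by_cases hc : colum + 1 > 10
    · rw [if_pos hc, ih (position + 1) hk]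
      simp only [pvStep, if_pos hc]
    · rw [if_neg hc, ih (position + 1) hk]
      simp only [pvStep, if_neg hc]

-- ===== VERDICT (by name: the statement is the Claim_ definition above) =====
theorem ascii_decode_spec : Claim_equal_ascii_decode := by
  intro position txt colum _ _
  unfold Spec_ascii_decode
  rw [ascii_decode_alt_eq, ascii_decode_eq_fold (128 - position).toNat position rfl]
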